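-- pv_equiv track=rewrite | github.com/kangnathan/fibonacci_lucas_tribonacci | fib_luc_tri.py | find_in_fibonacci
-- ===== SOURCE A (Python) =====
-- def find_in_fibonacci(number):
--     fibonacci_sequence = [1, 1]
--     while fibonacci_sequence[-1] < number:
--         next_number = fibonacci_sequence[-1] + fibonacci_sequence[-2]
--         fibonacci_sequence.append(next_number)
--     if number in fibonacci_sequence:
--         return fibonacci_sequence.index(number) + 1
--     else:
--         return -1
-- ===== SOURCE B (Python) =====
-- def _fib_pair(k):
--     # fast doubling: returns (F(k), F(k+1)) with F(0)=0, F(1)=1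
--     if k == 0:
--         return (0, 1)
--     a, b = _fib_pair(k // 2)
--     c = a * (2 * b - a)
--     d = a * a + b * b
--     if k % 2 == 0:
--         return (c, d)
--     return (d, c + d)
--
--
-- def _fib(k):
--     return _fib_pair(k)[0]
--
--
-- def find_in_fibonacci(number):
--     # Positions are 1-based over the sequence 1, 1, 2, 3, 5, ... i.e. value at
--     # position p is F(p); the duplicated 1 makes position 1 the first match.
--     if number == 1:
--         return 1
--     if number < 1:
--         return -1
--     # gallop: find a power-of-two index hi with F(hi) >= number
--     hi = 2
--     while _fib(hi) < number:
--         hi *= 2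
--     # binary search the index in [2, hi]; F is strictly increasing there
--     lo = 2
--     while lo <= hi:
--         mid = (lo + hi) // 2
--         f = _fib(mid)
--         if f == number:
--             return mid
--         if f < number:
--             lo = mid + 1
--         else:
--             hi = mid - 1
--     return -1
-- ===== Notes on version B (the rewrite author's own statement) =====
-- stated objective: alternative
-- what changed: B replaces A's linear generate-then-scan (build the whole Fibonacci list, then 'in' plus '.index') with a galloping upper bound followed by a binary search over the 1-based position, computing each probed Fibonacci value independently via fast doubling.
import Mathlib
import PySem

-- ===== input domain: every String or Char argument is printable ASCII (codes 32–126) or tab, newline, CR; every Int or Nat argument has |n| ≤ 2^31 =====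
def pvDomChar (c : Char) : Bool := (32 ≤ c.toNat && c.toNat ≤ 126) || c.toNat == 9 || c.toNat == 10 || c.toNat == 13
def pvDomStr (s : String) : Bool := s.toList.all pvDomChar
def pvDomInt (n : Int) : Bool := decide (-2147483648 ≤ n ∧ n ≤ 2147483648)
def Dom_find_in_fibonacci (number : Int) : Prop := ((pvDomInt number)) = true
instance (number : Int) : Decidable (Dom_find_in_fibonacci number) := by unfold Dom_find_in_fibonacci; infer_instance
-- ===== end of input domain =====

-- B replaces A's linear generate-then-scan (build the list, 'in', '.index') by a binary
-- search over the 1-based position, computing each probed Fibonacci value with fast doubling.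

-- ===== PORT A =====
-- A's while loop; the fuel and the 'none' arms are totality guards only (the list always
-- has ≥ 2 elements, and the last term grows by ≥ 1 each iteration, so fuel suffices on Dom).
def aLoop (number : Int) (fuel : Nat) (seq : List Int) : List Int :=
  match fuel with
  | 0 => seq
  | fuel + 1 =>
    match PySem.List.pyGet? seq (-1), PySem.List.pyGet? seq (-2) with
    | some last, some prev =>
      if last < number then aLoop number fuel (seq ++ [last + prev]) else seq
    | _, _ => seq

def find_in_fibonacci (number : Int) : Int :=
  let seq := aLoop number (number.toNat + 1) [1, 1]
  match PySem.List.index? seq number with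
  | some i => (i : Int) + 1
  | none => -1

-- ===== PORT B =====
-- _fib_pair: fast doubling, (F(k), F(k+1)); k is a nonnegative index in Source B, so Nat is exact.
def fibPair : Nat → Int × Int
  | 0 => (0, 1)
  | k + 1 =>
    let p := fibPair ((k + 1) / 2)
    let a := p.1
    let b := p.2
    let c := a * (2 * b - a)
    let d := a * a + b * b
    if (k + 1) % 2 = 0 then (c, d) else (d, c + d)
decreasing_by exact Nat.div_lt_self (Nat.succ_pos k) (by omega)

-- _fib: callers pass indices ≥ 2, so .toNat is exact.
def fibB (k : Int) : Int := (fibPair k.toNat).1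

-- B's galloping while loop; fuel is a totality guard only (hi doubles each step).
def gallop (number : Int) : Nat → Int → Int
  | 0, hi => hi
  | fuel + 1, hi => if fibB hi < number then gallop number fuel (hi * 2) else hi

-- B's binary-search while loop; fuel is a totality guard only (the interval shrinks each step).
def bsearch (number : Int) : Nat → Int → Int → Int
  | 0, _, _ => -1
  | fuel + 1, lo, hi =>
    if lo ≤ hi then
      let mid := PySem.Int.floordiv (lo + hi) 2
      let f := fibB mid
      if f = number then mid
      else if f < number then bsearch number fuel (mid + 1) hi
      else bsearch number fuel lo (mid - 1)
    else -1

def find_in_fibonacci_alt (number : Int) : Int :=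
  if number = 1 then 1
  else if number < 1 then -1
  else bsearch number 128 2 (gallop number 64 2)

-- ===== PRECONDITION & SPEC =====
def Spec_find_in_fibonacci (number : Int) (out : Int) : Prop := out = find_in_fibonacci_alt number
instance (number : Int) (out : Int) : Decidable (Spec_find_in_fibonacci number out) := by unfold Spec_find_in_fibonacci; infer_instance

-- ===== CLAIM (what is proved, stated in full; the proofs are below) =====
def Claim_equal_find_in_fibonacci : Prop := ∀ (number : Int), Dom_find_in_fibonacci number → Spec_find_in_fibonacci number (find_in_fibonacci number)

-- ===== LEMMAS AND PROOFS =====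

-- F at an Int position (proof helper).
def fibZ (k : Int) : Int := (Nat.fib k.toNat : Int)

-- A's post-loop answer, as a helper for the proofs.
def answerA (number : Int) (seq : List Int) : Int :=
  match PySem.List.index? seq number with
  | some i => (i : Int) + 1
  | none => -1

-- scalar reference loop (proof helper bridging A's list loop and B's binary search)
def bLoop (number : Int) (fuel : Nat) (a b pos : Int) : Int :=
  match fuel with
  | 0 => if a = number then pos else -1
  | fuel + 1 =>
    if a < number then bLoop number fuel b (a + b) (pos + 1)
    else if a = number then pos else -1

lemma fibPair_eq : ∀ k : Nat, fibPair k = ((Nat.fib k : Int), (Nat.fib (k + 1) : Int)) := by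
  intro k
  induction k using Nat.strong_induction_on with
  | _ k ih =>
    match k with
    | 0 => simp [fibPair]
    | n + 1 =>
      have hlt : (n + 1) / 2 < n + 1 := Nat.div_lt_self (Nat.succ_pos n) (by omega)
      have ihh := ih ((n + 1) / 2) hlt
      rw [fibPair, ihh]
      set m := (n + 1) / 2 with hm
      have hb : Nat.fib m ≤ 2 * Nat.fib (m + 1) := by
        have := Nat.fib_mono (show m ≤ m + 1 by omega); omega
      by_cases hpar : (n + 1) % 2 = 0
      · have h2m : n + 1 = 2 * m := by omega
        have e1 : Nat.fib (n + 1) = Nat.fib m * (2 * Nat.fib (m + 1) - Nat.fib m) := by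
          rw [h2m, Nat.fib_two_mul]
        have e2 : Nat.fib (n + 1 + 1) = Nat.fib (m + 1) ^ 2 + Nat.fib m ^ 2 := by
          rw [show n + 1 + 1 = 2 * m + 1 by omega, Nat.fib_two_mul_add_one]
        simp only [if_pos hpar, Prod.mk.injEq]
        constructor
        · rw [e1]; push_cast [hb]; ring
        · rw [e2]; push_cast; ring
      · have h2m : n + 1 = 2 * m + 1 := by omega
        have e1 : Nat.fib (n + 1) = Nat.fib (m + 1) ^ 2 + Nat.fib m ^ 2 := by
          rw [h2m, Nat.fib_two_mul_add_one]
        have e2 : Nat.fib (n + 1 + 1) =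
            Nat.fib m * (2 * Nat.fib (m + 1) - Nat.fib m)
              + (Nat.fib (m + 1) ^ 2 + Nat.fib m ^ 2) := by
          rw [show n + 1 + 1 = 2 * m + 2 by omega,
            show 2 * m + 2 = 2 * m + 2 from rfl]
          rw [Nat.fib_add_two, ← Nat.fib_two_mul, ← Nat.fib_two_mul_add_one]
        simp only [if_neg hpar, Prod.mk.injEq]
        constructor
        · rw [e1]; push_cast; ring
        · rw [e2]; push_cast [hb]; ring

lemma fibB_eq (k : Int) : fibB k = fibZ k := by
  rw [fibB, fibPair_eq, fibZ]

lemma fibZ_lt (a b : Int) (ha : 2 ≤ a) (hab : a < b) : fibZ a < fibZ b := by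
  rw [fibZ, fibZ]
  have h1 : 2 ≤ a.toNat := by omega
  have h2 : a.toNat < b.toNat := by omega
  have key : ∀ i j : Nat, 2 ≤ i → i < j → Nat.fib i < Nat.fib j := by
    intro i j hi hij
    calc Nat.fib i < Nat.fib (i + 1) := Nat.fib_lt_fib_succ hi
      _ ≤ Nat.fib j := Nat.fib_mono (by omega)
  exact_mod_cast key a.toNat b.toNat h1 h2

lemma fibZ_add_two (p : Int) (hp : 0 ≤ p) : fibZ (p + 2) = fibZ p + fibZ (p + 1) := by
  rw [fibZ, fibZ, fibZ, show (p + 2).toNat = p.toNat + 2 by omega,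
    show (p + 1).toNat = p.toNat + 1 by omega, Nat.fib_add_two]
  push_cast; ring

lemma fibZ_small (p : Int) (h1 : 1 ≤ p) (h2 : p ≤ 2) : fibZ p = 1 := by
  have : p = 1 ∨ p = 2 := by omega
  rcases this with h | h <;> subst h <;> decide

lemma fib_ge (p : Nat) : p ≤ Nat.fib p + 2 := by
  induction p using Nat.strong_induction_on with
  | _ p ih =>
    match p with
    | 0 => decide
    | 1 => decide
    | 2 => decide
    | n + 3 =>
      have h1 := ih (n + 2) (by omega)
      have h2 : 1 ≤ Nat.fib (n + 1) := Nat.fib_pos.mpr (by omega)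
      have h3 : Nat.fib (n + 3) = Nat.fib (n + 1) + Nat.fib (n + 2) := by
        rw [show n + 3 = n + 1 + 2 from rfl, Nat.fib_add_two]
      omega

lemma gallop_spec (number : Int) (hfib : number ≤ fibZ 64) :
    ∀ (fuel m : Nat) (hi : Int), hi = 2 ^ m → 1 ≤ m → m ≤ 6 → 6 - m ≤ fuel →
      2 ≤ gallop number fuel hi ∧ gallop number fuel hi ≤ 64 ∧
        number ≤ fibZ (gallop number fuel hi) := by
  intro fuel
  induction fuel with
  | zero =>
    intro m hi hhi h1 h6 hf
    have hm : m = 6 := by omega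
    subst hm
    have : hi = 64 := by rw [hhi]; norm_num
    subst this
    rw [gallop]
    exact ⟨by norm_num, le_refl _, hfib⟩
  | succ fuel ihf =>
    intro m hi hhi h1 h6 hf
    rw [gallop]
    by_cases hc : fibB hi < number
    · rw [if_pos hc]
      have hm6 : m ≠ 6 := by
        intro hm; subst hm
        have : hi = 64 := by rw [hhi]; norm_num
        subst this
        rw [fibB_eq] at hc; omega
      have := ihf (m + 1) (hi * 2) (by rw [hhi]; ring) (by omega) (by omega) (by omega)
      exact this
    · rw [if_neg hc]
      rw [fibB_eq] at hc
      have hge2 : (2 : Int) ≤ hi := by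
        rw [hhi]
        calc (2:Int) = 2 ^ 1 := by norm_num
          _ ≤ 2 ^ m := by exact pow_le_pow_right₀ (by norm_num) h1
      have hle : hi ≤ 64 := by
        rw [hhi]
        calc (2:Int) ^ m ≤ 2 ^ 6 := by exact pow_le_pow_right₀ (by norm_num) h6
          _ = 64 := by norm_num
      exact ⟨hge2, hle, by omega⟩

lemma bsearch_found (number p0 : Int) (hp0 : 2 ≤ p0) (hf : fibZ p0 = number) :
    ∀ (fuel : Nat) (lo hi : Int), 2 ≤ lo → lo ≤ p0 → p0 ≤ hi → (hi + 1 - lo).toNat ≤ fuel →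
      bsearch number fuel lo hi = p0 := by
  intro fuel
  induction fuel with
  | zero => intro lo hi h2 hl hh hfu; omega
  | succ fuel ih =>
    intro lo hi h2 hl hh hfu
    have hlohi : lo ≤ hi := by omega
    simp only [bsearch, if_pos hlohi]
    have hmid := PySem.Int.floordiv_two_mid_bounds hlohi
    set mid := PySem.Int.floordiv (lo + hi) 2 with hm
    rw [fibB_eq]
    by_cases he : fibZ mid = number
    · rw [if_pos he]
      by_cases hlt : mid < p0
      · exact absurd (hf ▸ fibZ_lt mid p0 (by omega) hlt) (by rw [he]; omega)
      · by_cases hgt : p0 < mid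
        · exact absurd (he ▸ fibZ_lt p0 mid hp0 hgt) (by rw [hf]; omega)
        · omega
    · rw [if_neg he]
      by_cases hlt : fibZ mid < number
      · rw [if_pos hlt]
        have hmp : mid < p0 := by
          by_contra hcon
          push_neg at hcon
          have hne : p0 ≠ mid := fun hh => he (hh ▸ hf)
          have := fibZ_lt p0 mid hp0 (by omega)
          omega
        exact ih (mid + 1) hi (by omega) (by omega) hh (by omega)
      · rw [if_neg hlt]
        have hmp : p0 < mid := by
          by_contra hcon
          push_neg at hcon
          have hne : mid ≠ p0 := fun hh => he (by rw [hh]; exact hf)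
          have := fibZ_lt mid p0 (by omega) (by omega)
          omega
        exact ih lo (mid - 1) h2 hl (by omega) (by omega)

lemma bsearch_none (number : Int) :
    ∀ (fuel : Nat) (lo hi : Int), 2 ≤ lo →
      (∀ q : Int, lo ≤ q → q ≤ hi → fibZ q ≠ number) →
      bsearch number fuel lo hi = -1 := by
  intro fuel
  induction fuel with
  | zero => intro lo hi _ _; rfl
  | succ fuel ih =>
    intro lo hi h2 hno
    by_cases hlohi : lo ≤ hi
    · simp only [bsearch, if_pos hlohi]
      have hmid := PySem.Int.floordiv_two_mid_bounds hlohi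
      set mid := PySem.Int.floordiv (lo + hi) 2 with hm
      rw [fibB_eq]
      rw [if_neg (hno mid (by omega) (by omega))]
      by_cases hlt : fibZ mid < number
      · rw [if_pos hlt]
        exact ih (mid + 1) hi (by omega) (fun q hq1 hq2 => hno q (by omega) hq2)
      · rw [if_neg hlt]
        exact ih lo (mid - 1) h2 (fun q hq1 hq2 => hno q hq1 (by omega))
    · rw [bsearch, if_neg hlohi]

-- the stopped state of the reference loop equals B's answer
lemma stop_case (number p : Int) (h2 : 2 ≤ number) (hfib : number ≤ fibZ 64) (hp : 1 ≤ p)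
    (hinv : ∀ r : Int, 1 ≤ r → r < p → fibZ r < number) (hge : number ≤ fibZ p) (fuel : Nat) :
    bLoop number fuel (fibZ p) (fibZ (p + 1)) p = find_in_fibonacci_alt number := by
  have hstop : bLoop number fuel (fibZ p) (fibZ (p + 1)) p =
      if fibZ p = number then p else -1 := by
    cases fuel with
    | zero => rfl
    | succ fuel => rw [bLoop, if_neg (by omega)]
  have hg := gallop_spec number hfib 64 1 2 (by norm_num) (by norm_num) (by norm_num) (by norm_num)
  set hi := gallop number 64 2 with hhi
  have halt : find_in_fibonacci_alt number = bsearch number 128 2 hi := by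
    rw [find_in_fibonacci_alt, if_neg (by omega), if_neg (by omega)]
  have hp3 : fibZ p = number ∨ 3 ≤ p := by
    by_cases h : p ≤ 2
    · left
      have := fibZ_small p hp h
      -- p ≤ 2 means fibZ p = 1 < number, contradicting number ≤ fibZ p
      omega
    · right; omega
  rw [hstop, halt]
  by_cases he : fibZ p = number
  · rw [if_pos he]
    have hpge2 : 2 ≤ p := by
      by_contra hcon
      have : p = 1 := by omega
      subst this
      have : fibZ 1 = 1 := by decide
      omega
    have hphi : p ≤ hi := by
      by_contra hcon
      push_neg at hcon
      have := fibZ_lt hi p (by omega) hcon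
      omega
    exact (bsearch_found number p hpge2 he 128 2 hi (by norm_num) hpge2 hphi (by omega)).symm
  · rw [if_neg he]
    have hp3' : 3 ≤ p := hp3.resolve_left he
    refine (bsearch_none number 128 2 hi (by norm_num) ?_).symm
    intro q hq1 hq2
    by_cases hqp : q < p
    · exact ne_of_lt (hinv q (by omega) hqp)
    · push_neg at hqp
      rcases lt_or_eq_of_le hqp with h | h
      · have := fibZ_lt p q (by omega) h
        omega
      · exact h ▸ he

-- the reference loop, started anywhere on the Fibonacci ladder, equals B's answer
lemma main_loop (number : Int) (h2 : 2 ≤ number) (hfib : number ≤ fibZ 64) :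
    ∀ (k fuel : Nat) (p : Int), 1 ≤ p → k + 1 ≤ fuel →
      (∀ r : Int, 1 ≤ r → r < p → fibZ r < number) →
      number ≤ fibZ (p + k) →
      bLoop number fuel (fibZ p) (fibZ (p + 1)) p = find_in_fibonacci_alt number := by
  intro k
  induction k with
  | zero =>
    intro fuel p hp hfuel hinv hub
    simp only [Nat.cast_zero, add_zero] at hub
    exact stop_case number p h2 hfib hp hinv hub fuel
  | succ k ih =>
    intro fuel p hp hfuel hinv hub
    by_cases hlt : fibZ p < number
    · obtain ⟨fuel', rfl⟩ : ∃ f', fuel = f' + 1 := ⟨fuel - 1, by omega⟩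
      rw [bLoop, if_pos hlt]
      have hsum : fibZ p + fibZ (p + 1) = fibZ (p + 1 + 1) := by
        rw [show p + 1 + 1 = p + 2 by ring, fibZ_add_two p (by omega)]
      rw [hsum]
      apply ih fuel' (p + 1) (by omega) (by omega)
      · intro r hr1 hr2
        by_cases h : r < p
        · exact hinv r hr1 h
        · have : r = p := by omega
          subst this; exact hlt
      · have : p + 1 + (k : Int) = p + ((k : Nat) + 1 : Nat) := by push_cast; ring
        rw [this]; exact hub
    · exact stop_case number p h2 hfib hp hinv (by omega) fuel

-- ===== A-side lemmas =====

lemma answerA_final (number : Int) (init : List Int) (p a : Int)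
    (hlt : ∀ x ∈ init ++ [p], x < number) :
    answerA number (init ++ [p, a]) =
      if a = number then ((init.length : Int) + 2) else -1 := by
  have hshape : init ++ [p, a] = (init ++ [p]) ++ [a] := by simp
  by_cases ha : a = number
  · subst ha
    have hnm : a ∉ init ++ [p] := fun hm => lt_irrefl a (hlt a hm)
    rw [hshape, answerA, PySem.List.index?_append_singleton_self (init ++ [p]) a hnm]
    simp; ring
  · have hnm : number ∉ init ++ [p, a] := by
      intro hm
      rw [hshape] at hm
      rcases List.mem_append.mp hm with h | h
      · exact lt_irrefl number (hlt number h)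
      · simp at h; exact ha h.symm
    rw [answerA, (PySem.List.index?_eq_none_iff _ _).mpr hnm]
    simp [ha]

lemma pyGet_last (init : List Int) (p a : Int) :
    PySem.List.pyGet? (init ++ [p, a]) (-1) = some a := by
  have : init ++ [p, a] = (init ++ [p]) ++ [a] := by simp
  rw [this, PySem.List.pyGet?_neg_one_append_singleton]

lemma pyGet_snd_last (init : List Int) (p a : Int) :
    PySem.List.pyGet? (init ++ [p, a]) (-2) = some p := by
  rw [PySem.List.pyGet?_neg_ofNat (init ++ [p, a]) 2 (by omega) (by simp)]
  simp

lemma key (number : Int) :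
    ∀ (fuel : Nat) (init : List Int) (p a : Int),
      (∀ x ∈ init ++ [p], x < number) →
      answerA number (aLoop number fuel (init ++ [p, a])) =
        bLoop number fuel a (a + p) ((init.length : Int) + 2) := by
  intro fuel
  induction fuel with
  | zero =>
    intro init p a hlt
    rw [aLoop, bLoop, answerA_final number init p a hlt]
  | succ fuel ih =>
    intro init p a hlt
    rw [aLoop, bLoop, pyGet_last, pyGet_snd_last]
    dsimp only
    by_cases hc : a < number
    · rw [if_pos hc, if_pos hc]
      have hshape : (init ++ [p, a]) ++ [a + p] = (init ++ [p]) ++ [a, a + p] := by simp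
      rw [hshape]
      have hlt' : ∀ x ∈ (init ++ [p]) ++ [a], x < number := by
        intro x hx
        rcases List.mem_append.mp hx with h | h
        · exact hlt x h
        · simp at h; omega
      rw [ih (init ++ [p]) a (a + p) hlt']
      have h1 : (a + p) + a = a + (a + p) := by ring
      have h2 : (((init ++ [p]).length : Int) + 2) = ((init.length : Int) + 2) + 1 := by
        simp; ring
      rw [h1, h2]
    · rw [if_neg hc, if_neg hc, answerA_final number init p a hlt]

lemma findA_eq_answerA (number : Int) :
    find_in_fibonacci number = answerA number (aLoop number (number.toNat + 1) [1, 1]) := by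
  rfl

lemma A_eq_bLoop (number : Int) :
    find_in_fibonacci number = bLoop number (number.toNat + 2) 1 1 1 := by
  rw [findA_eq_answerA]
  by_cases h2 : 2 ≤ number
  · have hlt : ∀ x ∈ ([] : List Int) ++ [(1 : Int)], x < number := by
      intro x hx; simp at hx; omega
    have hA := key number (number.toNat + 1) [] 1 1 hlt
    simp only [List.nil_append, List.length_nil] at hA
    have hB : bLoop number (number.toNat + 2) 1 1 1 = bLoop number (number.toNat + 1) 1 2 2 := by
      show bLoop number (number.toNat + 1 + 1) 1 1 1 = _
      rw [bLoop, if_pos (by omega : (1:Int) < number)]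
      norm_num
    rw [hB]
    have : (1 : Int) + 1 = 2 := by norm_num
    simpa [this] using hA
  · -- number ≤ 1: both loops stop immediately
    have hA : aLoop number (number.toNat + 1) [1, 1] = [1, 1] := by
      rw [aLoop]
      have h1 : PySem.List.pyGet? ([1, 1] : List Int) (-1) = some 1 := by decide
      have h2' : PySem.List.pyGet? ([1, 1] : List Int) (-2) = some 1 := by decide
      rw [h1, h2']
      dsimp only
      rw [if_neg (by omega : ¬ (1 : Int) < number)]
    rw [hA]
    show answerA number [1, 1] = bLoop number (number.toNat + 2) 1 1 1
    rw [bLoop, if_neg (by omega : ¬ (1 : Int) < number)]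
    by_cases h1 : number = 1
    · subst h1; decide
    · have : number ∉ ([1, 1] : List Int) := by
        simp; omega
      rw [answerA, (PySem.List.index?_eq_none_iff _ _).mpr this,
        if_neg (fun h => h1 h.symm)]

-- ===== VERDICT (by name: the statement is the Claim_ definition above) =====
theorem find_in_fibonacci_spec : Claim_equal_find_in_fibonacci := by
  intro number hdom
  unfold Spec_find_in_fibonacci
  rw [A_eq_bLoop]
  by_cases h2 : 2 ≤ number
  · -- number ≥ 2: both equal the stopped reference loop
    have hdom' : number ≤ 2147483648 := by
      have h := hdom
      unfold Dom_find_in_fibonacci pvDomInt at h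
      exact (of_decide_eq_true h).2
    have hfib : number ≤ fibZ 64 := by
      have : (2147483648 : Int) ≤ fibZ 64 := by decide
      omega
    -- least k with number ≤ F(1 + k)
    have hex : ∃ k : Nat, number ≤ fibZ (1 + (k : Int)) := ⟨63, by norm_num; omega⟩
    set k0 := Nat.find hex with hk0
    have hspec : number ≤ fibZ (1 + (k0 : Int)) := Nat.find_spec hex
    have hmin : ∀ j : Nat, j < k0 → fibZ (1 + (j : Int)) < number := by
      intro j hj
      have := Nat.find_min hex hj
      omega
    have hfuel : k0 + 1 ≤ number.toNat + 2 := by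
      rcases Nat.eq_zero_or_pos k0 with h | h
      · omega
      · have hm := hmin (k0 - 1) (by omega)
        have hcast : (1 : Int) + ((k0 - 1 : Nat) : Int) = (k0 : Int) := by
          push_cast [Nat.cast_sub h]; ring
        rw [hcast] at hm
        have hge := fib_ge k0
        have : fibZ (k0 : Int) = (Nat.fib k0 : Int) := by
          rw [fibZ]; norm_num
        rw [this] at hm
        omega
    have hone : (1 : Int) = fibZ 1 := by decide
    have hone2 : (1 : Int) = fibZ (1 + 1) := by decide
    rw [show bLoop number (number.toNat + 2) 1 1 1 =
        bLoop number (number.toNat + 2) (fibZ 1) (fibZ (1 + 1)) 1 by rw [← hone, ← hone2]]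
    exact main_loop number h2 hfib k0 (number.toNat + 2) 1 (by norm_num) hfuel
      (by intro r h1 h2'; omega) hspec
  · -- number ≤ 1: the reference loop stops at once; evaluate both sides
    rw [bLoop, if_neg (by omega : ¬ (1 : Int) < number)]
    by_cases h1 : number = 1
    · subst h1; decide
    · rw [if_neg (fun h => h1 h.symm)]
      rw [find_in_fibonacci_alt, if_neg h1, if_pos (by omega)]
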